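-- pv_equiv track=rewrite | github.com/naecoyes/autoAppAnalyze | src/utils/device_manager.py | group_apps_by_developer
-- ===== SOURCE A (Python) =====
-- def group_apps_by_developer(packages):
--     """
--     Group apps by developer based on package name patterns.
--
--     Args:
--         packages (list): List of package names
--
--     Returns:
--         dict: Dictionary with developer names as keys and lists of apps as values
--     """
--     developer_groups = {}
--
--     for package in packages:
--         # Extract potential developer name from package name
--         # This is a heuristic approach - in reality, you'd need more sophisticated methods
--         parts = package.split('.')
--
--         # Common patterns for developer identification
--         if len(parts) >= 2:
--             # Try to identify developer from package name structure
--             # e.g., com.google.android.apps.photos -> google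
--             # e.g., com.whatsapp -> whatsapp
--             # e.g., com.facebook.katana -> facebook
--
--             if parts[0] == 'com' and len(parts) >= 3:
--                 if parts[1] in ['google', 'microsoft', 'facebook', 'twitter', 'instagram']:
--                     developer = parts[1]
--                 else:
--                     developer = parts[1] + '.' + parts[2] if len(parts) > 2 else parts[1]
--             else:
--                 developer = parts[0]
--
--             # Add to developer group
--             if developer not in developer_groups:
--                 developer_groups[developer] = []
--             developer_groups[developer].append(package)
--         else:
--             # Fallback for unusual package names
--             if 'unknown' not in developer_groups:
--                 developer_groups['unknown'] = []
--             developer_groups['unknown'].append(package)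
--
--     return developer_groups
-- ===== SOURCE B (Python) =====
-- def _dev_key(package):
--     parts = package.split('.')
--     if len(parts) < 2:
--         return 'unknown'
--     if parts[0] == 'com' and len(parts) >= 3:
--         if parts[1] in ['google', 'microsoft', 'facebook', 'twitter', 'instagram']:
--             return parts[1]
--         return parts[1] + '.' + parts[2]
--     return parts[0]
--
--
-- def group_apps_by_developer(packages):
--     keys = [_dev_key(p) for p in packages]
--     return {k: [p for p, kp in zip(packages, keys) if kp == k]
--             for k in dict.fromkeys(keys)}
-- ===== Notes on version B (the rewrite author's own statement) =====
-- stated objective: idiomatic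
-- what changed: A mutates a dict inside the loop (ensure-key then append); B factors the branch chain into a pure key function, computes all keys once, and builds the grouping in one shot as {k: filtered packages} over the ordered-distinct keys.
import Mathlib
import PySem

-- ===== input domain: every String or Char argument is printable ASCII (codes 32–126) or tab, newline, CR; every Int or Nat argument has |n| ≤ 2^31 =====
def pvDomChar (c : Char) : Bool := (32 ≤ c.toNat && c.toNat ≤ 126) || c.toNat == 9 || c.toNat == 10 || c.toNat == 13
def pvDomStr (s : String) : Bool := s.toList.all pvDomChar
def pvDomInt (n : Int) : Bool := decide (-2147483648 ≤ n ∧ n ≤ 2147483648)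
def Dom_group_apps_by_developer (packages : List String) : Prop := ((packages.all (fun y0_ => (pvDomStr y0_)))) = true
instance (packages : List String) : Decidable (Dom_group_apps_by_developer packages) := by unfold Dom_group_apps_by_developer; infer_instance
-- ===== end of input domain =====

-- B replaces A's incremental dict-mutation loop by a key function plus a one-shot
-- grouping (ordered-distinct keys, one filter per group); objective: idiomatic. Same result.

-- ===== PORT A =====
def group_apps_by_developer (packages : List String) : List (String × List String) :=
  let developer_groups : PySem.Dict String (List String) :=
    packages.foldl (fun developer_groups package =>
      let parts := (PySem.Str.split? package ".").getD []
      if parts.length ≥ 2 then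
        let developer :=
          if PySem.List.pyGetD parts 0 "" = "com" ∧ parts.length ≥ 3 then
            if PySem.List.pyGetD parts 1 "" ∈ ["google", "microsoft", "facebook", "twitter", "instagram"] then
              PySem.List.pyGetD parts 1 ""
            else
              -- conditional expression kept as in A: parts[1]+'.'+parts[2] if len(parts) > 2 else parts[1]
              if parts.length > 2 then
                PySem.List.pyGetD parts 1 "" ++ "." ++ PySem.List.pyGetD parts 2 ""
              else PySem.List.pyGetD parts 1 ""
          else PySem.List.pyGetD parts 0 ""
        let dg := if developer_groups.contains developer then developer_groups
                  else developer_groups.insert developer []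
        dg.modify developer [] (fun v => v ++ [package])
      else
        let dg := if developer_groups.contains "unknown" then developer_groups
                  else developer_groups.insert "unknown" []
        dg.modify "unknown" [] (fun v => v ++ [package])
      ) PySem.Dict.empty
  developer_groups.items

-- ===== PORT B =====
def devKey (package : String) : String :=
  let parts := (PySem.Str.split? package ".").getD []
  if parts.length < 2 then "unknown"
  else if PySem.List.pyGetD parts 0 "" = "com" ∧ parts.length ≥ 3 then
    if PySem.List.pyGetD parts 1 "" ∈ ["google", "microsoft", "facebook", "twitter", "instagram"] then
      PySem.List.pyGetD parts 1 ""
    else PySem.List.pyGetD parts 1 "" ++ "." ++ PySem.List.pyGetD parts 2 ""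
  else PySem.List.pyGetD parts 0 ""

def group_apps_by_developer_alt (packages : List String) : List (String × List String) :=
  let keys := packages.map devKey
  (PySem.List.dedup keys).map (fun k =>
    (k, ((packages.zip keys).filter (fun q => q.2 == k)).map (fun q => q.1)))

-- ===== PRECONDITION & SPEC =====
def Spec_group_apps_by_developer (packages : List String) (out : List (String × List String)) : Prop := out = group_apps_by_developer_alt packages
instance (packages : List String) (out : List (String × List String)) : Decidable (Spec_group_apps_by_developer packages out) := by unfold Spec_group_apps_by_developer; infer_instance

-- ===== CLAIM (what is proved, stated in full; the proofs are below) =====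
def Claim_equal_group_apps_by_developer : Prop := ∀ (packages : List String), Dom_group_apps_by_developer packages → Spec_group_apps_by_developer packages (group_apps_by_developer packages)

-- ===== LEMMAS AND PROOFS =====

-- "ensure key, then append" collapses to one modify
lemma ensure_then_modify (d : PySem.Dict String (List String)) (k : String)
    (f : List String → List String) :
    (if d.contains k then d else d.insert k []).modify k [] f = d.modify k [] f := by
  by_cases h : d.contains k = true
  · rw [if_pos h]
  · rw [if_neg h]
    have hb : d.contains k = false := by simpa using h
    simp only [PySem.Dict.modify, PySem.Dict.getD_insert_self]
    apply PySem.Dict.ext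
    rw [PySem.Dict.items_insert_of_contains _ _ (PySem.Dict.contains_insert_self d k []),
        PySem.Dict.items_insert_of_not_contains _ _ hb,
        PySem.Dict.items_insert_of_not_contains _ _ hb,
        PySem.Dict.getD_of_not_contains _ _ hb]
    have hnk : ∀ p ∈ d.items, (p.1 == k) = false := by
      intro q hq
      have hkm : k ∉ d.keys := by
        intro hk
        rw [(PySem.Dict.contains_iff_mem_keys d k).mpr hk] at hb
        simp at hb
      simp only [beq_eq_false_iff_ne, ne_eq]
      intro he
      exact hkm (he ▸ List.mem_map_of_mem hq)
    rw [List.map_append]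
    have hid : d.items.map (fun q => if (q.1 == k) = true then (k, f []) else q)
        = d.items := by
      rw [List.map_congr_left (fun q hq => by rw [if_neg (by simp [hnk q hq])])]
      exact List.map_id d.items
    rw [hid]
    simp

-- A's loop body is exactly "modify at devKey"
lemma stepA_eq (d : PySem.Dict String (List String)) (p : String) :
    (let parts := (PySem.Str.split? p ".").getD []
     if parts.length ≥ 2 then
       let developer :=
         if PySem.List.pyGetD parts 0 "" = "com" ∧ parts.length ≥ 3 then
           if PySem.List.pyGetD parts 1 "" ∈ ["google", "microsoft", "facebook", "twitter", "instagram"] then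
             PySem.List.pyGetD parts 1 ""
           else
             if parts.length > 2 then
               PySem.List.pyGetD parts 1 "" ++ "." ++ PySem.List.pyGetD parts 2 ""
             else PySem.List.pyGetD parts 1 ""
         else PySem.List.pyGetD parts 0 ""
       let dg := if d.contains developer then d else d.insert developer []
       dg.modify developer [] (fun v => v ++ [p])
     else
       let dg := if d.contains "unknown" then d else d.insert "unknown" []
       dg.modify "unknown" [] (fun v => v ++ [p])) =
    d.modify (devKey p) [] (fun v => v ++ [p]) := by
  by_cases h2 : ((PySem.Str.split? p ".").getD []).length ≥ 2
  · have hlt : ¬ ((PySem.Str.split? p ".").getD []).length < 2 := by omega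
    by_cases h3 : PySem.List.pyGetD ((PySem.Str.split? p ".").getD []) 0 "" = "com" ∧
        ((PySem.Str.split? p ".").getD []).length ≥ 3
    · have hgt : ((PySem.Str.split? p ".").getD []).length > 2 := by omega
      simp only [devKey, if_pos h2, if_neg hlt, if_pos h3, if_pos hgt, ensure_then_modify]
    · simp only [devKey, if_pos h2, if_neg hlt, if_neg h3, ensure_then_modify]
  · have hlt : ((PySem.Str.split? p ".").getD []).length < 2 := by omega
    simp only [devKey, if_neg h2, if_pos hlt, ensure_then_modify]

-- a dict with Nodup keys is determined by keys + getD
lemma items_eq_keys_map_getD (d : PySem.Dict String (List String)) (h : d.keys.Nodup) :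
    d.items = d.keys.map (fun k => (k, d.getD k [])) := by
  simp only [PySem.Dict.keys, List.map_map]
  have hcong : ∀ q ∈ d.items, ((fun k => (k, d.getD k [])) ∘ (fun q => q.1)) q = id q := by
    intro q hq
    have hm : (q.1, q.2) ∈ d.items := by simpa using hq
    have : d.getD q.1 [] = q.2 := PySem.Dict.getD_of_mem_items _ hm h []
    simp [Function.comp, this]
  rw [List.map_congr_left hcong]
  exact (List.map_id d.items).symm

-- the two per-key filters agree
lemma filters_agree (packages : List String) (k : String) :
    ((packages.zip (packages.map devKey)).filter (fun q => q.2 == k)).map (fun q => q.1) =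
    ((packages.map (fun p => (devKey p, p))).filter (fun q => q.1 == k)).map (fun q => q.2) := by
  induction packages with
  | nil => rfl
  | cons x xs ih =>
    by_cases h : devKey x == k <;> simp [h, ih]

lemma set_update_nil {α : Type} [BEq α] (xs : List α) :
    PySem.Set.update ([] : PySem.Set α) xs = PySem.Set.ofList xs := rfl

-- ===== VERDICT (by name: the statement is the Claim_ definition above) =====
theorem group_apps_by_developer_spec : Claim_equal_group_apps_by_developer := by
  intro packages _
  show group_apps_by_developer packages = group_apps_by_developer_alt packages
  unfold group_apps_by_developer group_apps_by_developer_alt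
  have hstep := funext (fun d => funext (fun p => stepA_eq d p))
  rw [hstep]
  have hmap : packages.foldl (fun d p => d.modify (devKey p) [] (fun v => v ++ [p]))
      PySem.Dict.empty =
      (packages.map (fun p => (devKey p, p))).foldl
        (fun d q => d.modify q.1 [] (fun v => v ++ [q.2])) PySem.Dict.empty := by
    rw [List.foldl_map]
  rw [hmap]
  set l := packages.map (fun p => (devKey p, p)) with hl
  have hnodup : ((l.foldl (fun d q => d.modify q.1 [] (fun v => v ++ [q.2]))
      PySem.Dict.empty)).keys.Nodup := by
    exact PySem.Dict.nodup_keys_foldl_modify_key l (fun q => q.1) []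
      (fun _ q => (fun v => v ++ [q.2])) PySem.Dict.empty (by simp)
  rw [items_eq_keys_map_getD _ hnodup]
  have hkeys : ((l.foldl (fun d q => d.modify q.1 [] (fun v => v ++ [q.2]))
      PySem.Dict.empty)).keys = PySem.Set.ofList (packages.map devKey) := by
    rw [PySem.Dict.keys_foldl_modify_key l (fun q => q.1) [] (fun _ q => (fun v => v ++ [q.2]))]
    simp only [PySem.Dict.keys_empty, set_update_nil, hl, List.map_map]
    rfl
  rw [hkeys]
  simp only [PySem.List.dedup]
  apply List.map_congr_left
  intro k _
  rw [PySem.Dict.getD_foldl_modify_append, PySem.Dict.getD_empty, filters_agree]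
  rfl
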